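-- pv_equiv track=rewrite | github.com/Usefulmech/earthmender-ai | phase4_dashboard/dashboard.py | _compute_monthly_trends
-- ===== SOURCE A (Python) =====
-- from collections import defaultdict
--
-- def _compute_monthly_trends(reports: list):
--     """ALL reports by month — open + resolved. Data never disappears."""
--     monthly = defaultdict(lambda: {"reported": 0, "resolved": 0})
--     for r in reports:
--         month = r.get("date", "")[:7]
--         if month:
--             monthly[month]["reported"] += 1
--             if r.get("status") == "RESOLVED":
--                 monthly[month]["resolved"] += 1
--     return dict(sorted(monthly.items()))
-- ===== SOURCE B (Python) =====
-- def _compute_monthly_trends(reports: list):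
--     """ALL reports by month — open + resolved. Data never disappears."""
--     months = [r.get("date", "")[:7] for r in reports]
--     out = {}
--     for m in sorted(set(m for m in months if m)):
--         out[m] = {
--             "reported": months.count(m),
--             "resolved": sum(1 for r in reports
--                             if r.get("date", "")[:7] == m and r.get("status") == "RESOLVED"),
--         }
--     return out
-- ===== Notes on version B (the rewrite author's own statement) =====
-- stated objective: alternative
-- what changed: B replaces A's single-pass defaultdict accumulation with a two-phase grouping: compute all months once, sort the set of nonempty months, then count reported/resolved per month with counting passes (months.count / sum of a filter), building the output directly in sorted order.
import Mathlib
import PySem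

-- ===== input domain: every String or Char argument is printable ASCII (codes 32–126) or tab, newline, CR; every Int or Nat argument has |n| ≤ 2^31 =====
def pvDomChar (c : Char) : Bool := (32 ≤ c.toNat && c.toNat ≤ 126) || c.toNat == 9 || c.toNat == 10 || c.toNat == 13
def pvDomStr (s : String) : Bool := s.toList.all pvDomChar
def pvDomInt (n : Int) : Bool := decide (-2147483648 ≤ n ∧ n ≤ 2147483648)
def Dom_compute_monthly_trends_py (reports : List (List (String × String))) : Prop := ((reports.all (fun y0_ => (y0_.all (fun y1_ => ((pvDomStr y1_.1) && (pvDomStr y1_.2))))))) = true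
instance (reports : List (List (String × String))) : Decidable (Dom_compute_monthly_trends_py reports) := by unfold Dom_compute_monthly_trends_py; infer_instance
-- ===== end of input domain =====

-- B re-groups by counting passes over a month-sorted key set instead of A's single-pass defaultdict
-- accumulation (objective: alternative decomposition, same results).

-- ===== PORT A =====
-- month = r.get("date", "")[:7]   (this very expression appears in both Pythons)
def pvMonth (r : List (String × String)) : String :=
  String.ofList (PySem.List.slice ((PySem.Dict.ofList r).getD "date" "").toList none (some 7))

-- r.get("status") == "RESOLVED"   (also common to both Pythons)
def pvResolved (r : List (String × String)) : Bool :=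
  (PySem.Dict.ofList r).get? "status" == some "RESOLVED"

-- the defaultdict's default value {"reported": 0, "resolved": 0}
def pvDflt : PySem.Dict String Int := PySem.Dict.ofList [("reported", 0), ("resolved", 0)]

-- one iteration of A's for-loop (defaultdict access = getD .. pvDflt; in-place += = modify + insert)
def pvStepA (d : PySem.Dict String (PySem.Dict String Int)) (r : List (String × String)) :
    PySem.Dict String (PySem.Dict String Int) :=
  let month := pvMonth r
  if month = "" then d
  else
    let d1 := d.insert month ((d.getD month pvDflt).modify "reported" 0 (· + 1))
    if pvResolved r then
      d1.insert month ((d1.getD month pvDflt).modify "resolved" 0 (· + 1))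
    else d1

-- dict(sorted(monthly.items())): the keys are distinct, so Python's pairwise tuple
-- comparison never reaches the second components and equals sorting by the key.
def compute_monthly_trends_py (reports : List (List (String × String))) :
    List (String × List (String × Int)) :=
  let monthly := reports.foldl pvStepA PySem.Dict.empty
  (PySem.List.sorted monthly.items (fun p => p.1) false).map (fun p => (p.1, p.2.items))

-- ===== PORT B =====
def compute_monthly_trends_py_alt (reports : List (List (String × String))) :
    List (String × List (String × Int)) :=
  let months := reports.map pvMonth
  let keys := PySem.List.sorted (PySem.Set.ofList (months.filter (fun m => m != ""))) (fun x => x) false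
  keys.foldl (fun out m => out ++ [(m,
      [("reported", (months.count m : Int)),
       ("resolved", (reports.countP (fun r => pvMonth r == m && pvResolved r) : Int))])]) []

-- ===== PRECONDITION & SPEC =====
def Spec_compute_monthly_trends_py (reports : List (List (String × String))) (out : List (String × List (String × Int))) : Prop := out = compute_monthly_trends_py_alt reports
instance (reports : List (List (String × String))) (out : List (String × List (String × Int))) : Decidable (Spec_compute_monthly_trends_py reports out) := by unfold Spec_compute_monthly_trends_py; infer_instance

-- ===== CLAIM (what is proved, stated in full; the proofs are below) =====
def Claim_equal_compute_monthly_trends_py : Prop := ∀ (reports : List (List (String × String))), Dom_compute_monthly_trends_py reports → Spec_compute_monthly_trends_py reports (compute_monthly_trends_py reports)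

-- ===== LEMMAS AND PROOFS =====

-- the value A's dict holds at month m after processing `reports` (characterised below)
def pvInnerVal (reports : List (List (String × String))) (m : String) : PySem.Dict String Int :=
  PySem.Dict.ofList
    [("reported", ((reports.map pvMonth).count m : Int)),
     ("resolved", (reports.countP (fun r => pvMonth r == m && pvResolved r) : Int))]

lemma pvInner_mod_rep (a b : Int) :
    ((PySem.Dict.ofList [("reported", a), ("resolved", b)]).modify "reported" 0 (· + 1))
      = PySem.Dict.ofList [("reported", a + 1), ("resolved", b)] := rfl

lemma pvInner_mod_res (a b : Int) :
    ((PySem.Dict.ofList [("reported", a), ("resolved", b)]).modify "resolved" 0 (· + 1))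
      = PySem.Dict.ofList [("reported", a), ("resolved", b + 1)] := rfl

lemma pvInner_items (a b : Int) :
    (PySem.Dict.ofList [("reported", a), ("resolved", b)]).items
      = [("reported", a), ("resolved", b)] := rfl

lemma pvSet_ofList_append_singleton (xs : List String) (x : String) :
    PySem.Set.ofList (xs ++ [x]) = PySem.Set.add (PySem.Set.ofList xs) x := by
  simp [PySem.Set.ofList_eq_foldl, List.foldl_append]

lemma pvStepA_skip (d : PySem.Dict String (PySem.Dict String Int)) (r : List (String × String))
    (h : pvMonth r = "") : pvStepA d r = d := by
  simp [pvStepA, h]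

lemma pvStepA_go (d : PySem.Dict String (PySem.Dict String Int)) (r : List (String × String))
    (h : ¬ pvMonth r = "") : pvStepA d r =
      (if pvResolved r then
        ((d.insert (pvMonth r) ((d.getD (pvMonth r) pvDflt).modify "reported" 0 (· + 1))).insert (pvMonth r)
          (((d.insert (pvMonth r) ((d.getD (pvMonth r) pvDflt).modify "reported" 0 (· + 1))).getD (pvMonth r) pvDflt).modify "resolved" 0 (· + 1)))
      else d.insert (pvMonth r) ((d.getD (pvMonth r) pvDflt).modify "reported" 0 (· + 1))) := by
  simp [pvStepA, h]

-- the loop invariant: keys of A's dict, and the dict's value at every nonempty month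
lemma pvFoldA_spec (reports : List (List (String × String))) :
    (reports.foldl pvStepA PySem.Dict.empty).keys
        = PySem.Set.ofList ((reports.map pvMonth).filter (fun m => m != "")) ∧
    ∀ m : String, m ≠ "" →
      (reports.foldl pvStepA PySem.Dict.empty).getD m pvDflt = pvInnerVal reports m := by
  induction reports using List.reverseRecOn with
  | nil =>
    refine ⟨rfl, fun m _ => ?_⟩
    simp [pvInnerVal, pvDflt, PySem.Dict.getD_empty]
  | append_singleton l r ih =>
    obtain ⟨ihk, ihv⟩ := ih
    rw [List.foldl_append]
    simp only [List.foldl_cons, List.foldl_nil]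
    set d := l.foldl pvStepA PySem.Dict.empty with hd
    by_cases hmo : pvMonth r = ""
    · -- empty month: the report is skipped and no count changes
      refine ⟨?_, ?_⟩
      · rw [pvStepA_skip d r hmo, ihk]
        simp [List.filter_append, hmo]
      · intro m hm
        have hne : (pvMonth r == m) = false := by
          rw [hmo]; simp; exact fun h => hm h
        have h1 : ((l ++ [r]).map pvMonth).count m = (l.map pvMonth).count m := by
          rw [List.map_append, List.count_append]
          simp [List.count_singleton, hne]
        have h2 : (l ++ [r]).countP (fun r' => pvMonth r' == m && pvResolved r')
            = l.countP (fun r' => pvMonth r' == m && pvResolved r') := by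
          rw [List.countP_append]
          simp [hne]
        rw [pvStepA_skip d r hmo, ihv m hm]
        unfold pvInnerVal
        rw [h1, h2]
    · -- nonempty month
      refine ⟨?_, ?_⟩
      · -- the key set gains (at most) pvMonth r, exactly as Set.add
        have hk1 : ∀ v, (d.insert (pvMonth r) v).keys = PySem.Set.add d.keys (pvMonth r) := by
          intro v
          by_cases hc : d.contains (pvMonth r) = true
          · rw [PySem.Dict.keys_insert_of_contains _ _ hc]
            have hmem : pvMonth r ∈ d.keys := by
              rw [PySem.Dict.contains_eq_decide_mem_keys] at hc
              exact of_decide_eq_true hc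
            simp [PySem.Set.add, PySem.Set.contains, hmem]
          · have hc' : d.contains (pvMonth r) = false := by simpa using hc
            rw [PySem.Dict.keys_insert_of_not_contains _ _ hc']
            have hmem : pvMonth r ∉ d.keys := by
              rw [PySem.Dict.contains_eq_decide_mem_keys] at hc'
              simpa using hc'
            simp [PySem.Set.add, PySem.Set.contains, hmem]
        have hfil : ((l ++ [r]).map pvMonth).filter (fun m => m != "")
            = (l.map pvMonth).filter (fun m => m != "") ++ [pvMonth r] := by
          rw [List.map_append, List.filter_append]
          simp [hmo]
        rw [pvStepA_go d r hmo, hfil, pvSet_ofList_append_singleton, ← ihk]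
        split
        · rw [PySem.Dict.keys_insert_of_contains _ _ (PySem.Dict.contains_insert_self _ _ _)]
          exact hk1 _
        · exact hk1 _
      · -- the stored value at every nonempty month m
        intro m hm
        rw [pvStepA_go d r hmo]
        by_cases hem : m = pvMonth r
        · have hbe : (pvMonth r == m) = true := by simp [hem]
          have h1 : ((l ++ [r]).map pvMonth).count m = (l.map pvMonth).count m + 1 := by
            rw [List.map_append, List.count_append]
            simp [List.count_singleton, hbe]
          have h2 : (l ++ [r]).countP (fun r' => pvMonth r' == m && pvResolved r')
              = l.countP (fun r' => pvMonth r' == m && pvResolved r')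
                + (if pvResolved r then 1 else 0) := by
            rw [List.countP_append]
            cases hres : pvResolved r <;> simp [hbe, hres]
          split
          · rename_i hres
            rw [PySem.Dict.getD_insert, if_pos hem, PySem.Dict.getD_insert_self, ← hem, ihv m hm]
            unfold pvInnerVal
            rw [pvInner_mod_rep, pvInner_mod_res, h1, h2, if_pos hres]
            push_cast
            rfl
          · rename_i hres
            have hres' : pvResolved r = false := by simpa using hres
            rw [PySem.Dict.getD_insert, if_pos hem, ← hem, ihv m hm]
            unfold pvInnerVal
            rw [pvInner_mod_rep, h1, h2, hres']
            push_cast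
            rfl
        · have hne : (pvMonth r == m) = false := by
            simp; exact fun h => hem h.symm
          have h1 : ((l ++ [r]).map pvMonth).count m = (l.map pvMonth).count m := by
            rw [List.map_append, List.count_append]
            simp [List.count_singleton, hne]
          have h2 : (l ++ [r]).countP (fun r' => pvMonth r' == m && pvResolved r')
              = l.countP (fun r' => pvMonth r' == m && pvResolved r') := by
            rw [List.countP_append]
            simp [hne]
          split
          · rw [PySem.Dict.getD_insert_of_ne _ _ _ hem, PySem.Dict.getD_insert_of_ne _ _ _ hem, ihv m hm]
            unfold pvInnerVal
            rw [h1, h2]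
          · rw [PySem.Dict.getD_insert_of_ne _ _ _ hem, ihv m hm]
            unfold pvInnerVal
            rw [h1, h2]

-- ===== VERDICT (by name: the statement is the Claim_ definition above) =====
theorem compute_monthly_trends_py_spec : Claim_equal_compute_monthly_trends_py := by
  intro reports _
  unfold Spec_compute_monthly_trends_py
  simp only [compute_monthly_trends_py, compute_monthly_trends_py_alt]
  obtain ⟨hk, hv⟩ := pvFoldA_spec reports
  set d := reports.foldl pvStepA PySem.Dict.empty with hd
  set fl := (reports.map pvMonth).filter (fun m => m != "") with hfl
  have hnd : d.keys.Nodup := hk ▸ PySem.Set.nodup_ofList fl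
  have hitems := PySem.Dict.items_eq_map_keys d hnd pvDflt
  have hperm : ((PySem.List.sorted (PySem.Set.ofList fl) (fun x => x) false).map
      (fun k => (k, d.getD k pvDflt))).Perm d.items := by
    rw [hitems, hk]
    exact List.Perm.map _ (PySem.List.sorted_perm _ _ _)
  have hpw : ((PySem.List.sorted (PySem.Set.ofList fl) (fun x => x) false).map
      (fun k => (k, d.getD k pvDflt))).Pairwise (fun a b => a.1 < b.1) := by
    rw [List.pairwise_map]
    exact PySem.List.sorted_ofList_pairwise_lt fl
  have hsort : PySem.List.sorted d.items (fun p => p.1) false =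
      (PySem.List.sorted (PySem.Set.ofList fl) (fun x => x) false).map
        (fun k => (k, d.getD k pvDflt)) :=
    PySem.List.sorted_eq_of_perm_of_pairwise_lt _ _ _ hperm hpw
  rw [hsort, PySem.List.foldl_append_singleton_eq_map
    (f := fun m => (m,
      [("reported", (((reports.map pvMonth).count m : Nat) : Int)),
       ("resolved", ((reports.countP (fun r => pvMonth r == m && pvResolved r) : Nat) : Int))]))]
  rw [List.map_map, List.nil_append]
  apply List.map_congr_left
  intro k hks
  have hkfl : k ∈ fl := (PySem.Set.mem_ofList fl k).mp
    ((PySem.List.mem_sorted _ _ _ k).mp hks)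
  have hkne : k ≠ "" := by
    have := List.of_mem_filter hkfl
    simpa using this
  simp only [Function.comp]
  rw [hv k hkne]
  unfold pvInnerVal
  rw [pvInner_items]
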